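-- pv_equiv track=rewrite | github.com/JFielding7/PythonLeetCode | min_space_wasted_from_packaging.py | supplier_wasted
-- ===== SOURCE A (Python) =====
-- def least_not_fitting_package_idx(packages, start, size):
--     end = len(packages) - 1
--
--     while start <= end:
--         mid = start + end >> 1
--         if packages[mid] > size:
--             end = mid - 1
--         else:
--             start = mid + 1
--
--     return start
--
-- def supplier_wasted(packages, accumulated, supplier):
--     supplier.sort()
--     if packages[-1] > supplier[-1]:
--         return -1
--
--     wasted = 0
--     start = 0
--
--     for size in supplier:
--         least_not_fitting_idx = least_not_fitting_package_idx(packages, start, size)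
--         wasted += size * (least_not_fitting_idx - start) - accumulated[least_not_fitting_idx] + accumulated[start]
--         start = least_not_fitting_idx
--
--     return wasted
-- ===== SOURCE B (Python) =====
-- def supplier_wasted(packages, accumulated, supplier):
--     supplier.sort()
--     if packages[-1] > supplier[-1]:
--         return -1
--
--     wasted = 0
--     i = 0
--     n = len(packages)
--
--     for size in supplier:
--         start = i
--         while i < n and packages[i] <= size:
--             i += 1
--         wasted += size * (i - start) - accumulated[i] + accumulated[start]
--
--     return wasted
-- ===== Notes on version B (the rewrite author's own statement) =====
-- stated objective: alternative
-- what changed: The per-size binary search (bisection helper) is replaced by a single two-pointer merge: one index sweeps the sorted packages forward while iterating the sorted supplier sizes, using the same prefix-sum formula.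
-- outside the precondition, e.g. on supplier_wasted([5, 1, 1], [0, 5, 6, 7], [2]): A returns -1, B returns 0
import Mathlib
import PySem

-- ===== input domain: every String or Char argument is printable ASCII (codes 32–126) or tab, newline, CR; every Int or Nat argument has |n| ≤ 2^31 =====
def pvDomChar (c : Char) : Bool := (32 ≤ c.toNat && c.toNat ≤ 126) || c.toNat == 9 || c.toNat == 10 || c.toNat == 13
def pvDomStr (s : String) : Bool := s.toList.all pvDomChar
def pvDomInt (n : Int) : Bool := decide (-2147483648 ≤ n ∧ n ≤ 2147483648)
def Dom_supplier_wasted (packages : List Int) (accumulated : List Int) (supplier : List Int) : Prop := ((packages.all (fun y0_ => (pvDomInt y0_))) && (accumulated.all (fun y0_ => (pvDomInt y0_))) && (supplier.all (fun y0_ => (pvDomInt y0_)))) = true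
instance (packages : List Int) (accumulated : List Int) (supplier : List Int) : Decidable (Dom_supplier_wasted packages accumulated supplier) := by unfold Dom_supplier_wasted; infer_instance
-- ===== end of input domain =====

-- B replaces A's per-size binary search by a single two-pointer merge over the sorted lists
-- (same prefix-sum formula); return-value equivalence only — both A and B sort `supplier` in place.

-- ===== PORT A =====
-- the while-loop of least_not_fitting_package_idx; `start + end >> 1` is floor division by 2
-- (PySem.Int.floordiv); packages[mid] is in range whenever reached under Pre_, so pyGetD is exact there
def lnfpLoop (packages : List Int) (size start end_ : Int) : Int :=
  if h : start ≤ end_ then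
    let mid := PySem.Int.floordiv (start + end_) 2
    if PySem.List.pyGetD packages mid 0 > size then
      lnfpLoop packages size start (mid - 1)
    else
      lnfpLoop packages size (mid + 1) end_
  else start
termination_by (end_ + 1 - start).toNat
decreasing_by
  · have := PySem.Int.floordiv_two_mid_bounds h; omega
  · have := PySem.Int.floordiv_two_mid_bounds h; omega

def least_not_fitting_package_idx (packages : List Int) (start size : Int) : Int :=
  lnfpLoop packages size start ((packages.length : Int) - 1)

-- accumulated[...] indices are nonnegative and in range under Pre_, so pyGetD is exact there
def supplier_wasted (packages : List Int) (accumulated : List Int) (supplier : List Int) : Int :=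
  let s := PySem.List.sorted supplier (fun x => x) false
  if PySem.List.pyGetD packages (-1) 0 > PySem.List.pyGetD s (-1) 0 then -1
  else
    (s.foldl (fun (st : Int × Int) size =>
        let idx := least_not_fitting_package_idx packages st.2 size
        (st.1 + size * (idx - st.2) - PySem.List.pyGetD accumulated idx 0
           + PySem.List.pyGetD accumulated st.2 0, idx))
      ((0 : Int), (0 : Int))).1

-- ===== PORT B =====
-- the inner `while i < n and packages[i] <= size` loop of Source B
def advLoop (packages : List Int) (size i : Int) : Int :=
  if h : i < (packages.length : Int) ∧ PySem.List.pyGetD packages i 0 ≤ size then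
    advLoop packages size (i + 1)
  else i
termination_by ((packages.length : Int) - i).toNat
decreasing_by omega

-- the `for size in supplier` loop of Source B, carrying (i, wasted)
def bLoop (packages : List Int) (accumulated : List Int) (sizes : List Int) (i wasted : Int) : Int :=
  match sizes with
  | [] => wasted
  | size :: rest =>
      let j := advLoop packages size i
      bLoop packages accumulated rest j
        (wasted + size * (j - i) - PySem.List.pyGetD accumulated j 0
           + PySem.List.pyGetD accumulated i 0)

def supplier_wasted_alt (packages : List Int) (accumulated : List Int) (supplier : List Int) : Int :=
  let s := PySem.List.sorted supplier (fun x => x) false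
  if PySem.List.pyGetD packages (-1) 0 > PySem.List.pyGetD s (-1) 0 then -1
  else bLoop packages accumulated s 0 0

-- ===== PRECONDITION & SPEC =====
-- Pre_ excludes inputs where Python A raises IndexError (empty packages or supplier; when the -1
-- guard does not fire, accumulated shorter than len(packages)+1), and — when the guard does not
-- fire — unsorted packages, on which A's binary-search indices are accidents of bisection on
-- unordered data (the guard fires iff every supplier size is below packages[-1]).
def Pre_supplier_wasted (packages : List Int) (accumulated : List Int) (supplier : List Int) : Prop :=
  packages ≠ [] ∧ supplier ≠ [] ∧
    (¬ (∀ x ∈ supplier, x < PySem.List.pyGetD packages (-1) 0) →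
      (packages.Pairwise (· ≤ ·) ∧ packages.length + 1 ≤ accumulated.length))
instance (packages : List Int) (accumulated : List Int) (supplier : List Int) : Decidable (Pre_supplier_wasted packages accumulated supplier) := by unfold Pre_supplier_wasted; infer_instance

def pvWitness_supplier_wasted : List Int × List Int × List Int := ([1, 2], [0, 1, 3], [2, 3])

def Spec_supplier_wasted (packages : List Int) (accumulated : List Int) (supplier : List Int) (out : Int) : Prop := out = supplier_wasted_alt packages accumulated supplier
instance (packages : List Int) (accumulated : List Int) (supplier : List Int) (out : Int) : Decidable (Spec_supplier_wasted packages accumulated supplier out) := by unfold Spec_supplier_wasted; infer_instance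

-- ===== CLAIM (what is proved, stated in full; the proofs are below) =====
def Claim_equal_supplier_wasted : Prop := ∀ (packages : List Int) (accumulated : List Int) (supplier : List Int), Dom_supplier_wasted packages accumulated supplier → Pre_supplier_wasted packages accumulated supplier → Spec_supplier_wasted packages accumulated supplier (supplier_wasted packages accumulated supplier)

-- ===== LEMMAS AND PROOFS =====

-- in a sorted list, pyGetD at a smaller in-range nonnegative index is ≤
lemma getD_mono (packages : List Int) (hs : packages.Pairwise (· ≤ ·))
    {j k : Int} (h0 : 0 ≤ j) (hjk : j ≤ k) (hk : k < (packages.length : Int)) :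
    PySem.List.pyGetD packages j 0 ≤ PySem.List.pyGetD packages k 0 := by
  rw [PySem.List.pyGetD_eq_getElem _ _ h0 (by omega),
      PySem.List.pyGetD_eq_getElem _ _ (by omega) hk]
  rcases eq_or_lt_of_le hjk with h | h
  · subst h; exact le_refl _
  · exact List.pairwise_iff_getElem.mp hs j.toNat k.toNat (by omega) (by omega) (by omega)

-- A's binary search returns the first index r ≥ start whose package does not fit (or end_+1)
lemma lnfpLoop_spec (packages : List Int) (size : Int)
    (hs : packages.Pairwise (· ≤ ·)) :
    ∀ (start end_ : Int), 0 ≤ start → start ≤ end_ + 1 → end_ < (packages.length : Int) →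
      start ≤ lnfpLoop packages size start end_ ∧
      lnfpLoop packages size start end_ ≤ end_ + 1 ∧
      (∀ j, start ≤ j → j < lnfpLoop packages size start end_ →
        PySem.List.pyGetD packages j 0 ≤ size) ∧
      (lnfpLoop packages size start end_ ≤ end_ →
        PySem.List.pyGetD packages (lnfpLoop packages size start end_) 0 > size) := by
  intro start end_
  induction start, end_ using lnfpLoop.induct packages size with
  | case1 start end_ hle mid hgt ih =>
    intro h0 _ hend
    have hm : start ≤ mid ∧ mid ≤ end_ := PySem.Int.floordiv_two_mid_bounds hle
    have hunf : lnfpLoop packages size start end_ = lnfpLoop packages size start (mid - 1) := by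
      rw [lnfpLoop, dif_pos hle]
      show (if PySem.List.pyGetD packages mid 0 > size then lnfpLoop packages size start (mid - 1)
            else lnfpLoop packages size (mid + 1) end_) = _
      rw [if_pos hgt]
    rw [hunf]
    obtain ⟨i1, i2, i3, i4⟩ := ih h0 (by omega) (by omega)
    refine ⟨i1, by omega, i3, ?_⟩
    intro _
    rcases eq_or_lt_of_le i2 with h | h
    · have hr : lnfpLoop packages size start (mid - 1) = mid := by omega
      rw [hr]; exact hgt
    · exact i4 (by omega)
  | case2 start end_ hle mid hngt ih =>
    intro h0 _ hend
    have hm : start ≤ mid ∧ mid ≤ end_ := PySem.Int.floordiv_two_mid_bounds hle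
    have hunf : lnfpLoop packages size start end_ = lnfpLoop packages size (mid + 1) end_ := by
      rw [lnfpLoop, dif_pos hle]
      show (if PySem.List.pyGetD packages mid 0 > size then lnfpLoop packages size start (mid - 1)
            else lnfpLoop packages size (mid + 1) end_) = _
      rw [if_neg hngt]
    rw [hunf]
    obtain ⟨i1, i2, i3, i4⟩ := ih (by omega) (by omega) hend
    refine ⟨by omega, i2, ?_, i4⟩
    intro j hj1 hj2
    by_cases hjm : mid + 1 ≤ j
    · exact i3 j hjm hj2
    · calc PySem.List.pyGetD packages j 0
          ≤ PySem.List.pyGetD packages mid 0 := getD_mono packages hs (by omega) (by omega) (by omega)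
        _ ≤ size := by omega
  | case3 start end_ hnle =>
    intro h0 hse hend
    rw [lnfpLoop, dif_neg hnle]
    exact ⟨le_refl _, by omega, by omega, by omega⟩

-- B's pointer advance reaches exactly the first non-fitting index
lemma advLoop_eq (packages : List Int) (size r : Int)
    (hr : r ≤ (packages.length : Int))
    (hstop : r < (packages.length : Int) → PySem.List.pyGetD packages r 0 > size) :
    ∀ i, i ≤ r → (∀ j, i ≤ j → j < r → PySem.List.pyGetD packages j 0 ≤ size) →
      advLoop packages size i = r := by
  intro i
  induction i using advLoop.induct packages size with
  | case1 i hcond ih =>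
    intro hir hall
    rw [advLoop, dif_pos hcond]
    have hlt : i < r := by
      rcases lt_or_eq_of_le hir with h | h
      · exact h
      · exfalso; subst h; rcases hcond with ⟨h1, h2⟩; have := hstop h1; omega
    exact ih (by omega) (fun j h1 h2 => hall j (by omega) h2)
  | case2 i hcond =>
    intro hir hall
    rw [advLoop, dif_neg hcond]
    rw [not_and_or, not_lt, not_le] at hcond
    rcases lt_or_eq_of_le hir with h | h
    · exfalso
      have h1 : i < (packages.length : Int) := by omega
      have h2 := hall i le_rfl h
      rcases hcond with h3 | h3 <;> omega
    · exact h

-- on sorted packages the bisection and the pointer advance agree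
lemma lnfp_eq_adv (packages : List Int) (size start : Int)
    (hs : packages.Pairwise (· ≤ ·)) (h0 : 0 ≤ start) (hn : start ≤ (packages.length : Int)) :
    least_not_fitting_package_idx packages start size = advLoop packages size start := by
  unfold least_not_fitting_package_idx
  obtain ⟨h1, h2, h3, h4⟩ :=
    lnfpLoop_spec packages size hs start ((packages.length : Int) - 1) h0 (by omega) (by omega)
  exact (advLoop_eq packages size _ (by omega) (fun h => h4 (by omega)) start h1 h3).symm

-- the two supplier loops compute the same total from any common start pointer
lemma loops_eq (packages accumulated : List Int) (hs : packages.Pairwise (· ≤ ·)) :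
    ∀ (sizes : List Int) (w i : Int), 0 ≤ i → i ≤ (packages.length : Int) →
      (sizes.foldl (fun (st : Int × Int) size =>
          let idx := least_not_fitting_package_idx packages st.2 size
          (st.1 + size * (idx - st.2) - PySem.List.pyGetD accumulated idx 0
             + PySem.List.pyGetD accumulated st.2 0, idx)) (w, i)).1
        = bLoop packages accumulated sizes i w := by
  intro sizes
  induction sizes with
  | nil => intro w i _ _; simp [bLoop]
  | cons size rest ih =>
    intro w i h0 hn
    have heq : least_not_fitting_package_idx packages i size = advLoop packages size i :=
      lnfp_eq_adv packages size i hs h0 hn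
    obtain ⟨b1, b2, -, -⟩ :=
      lnfpLoop_spec packages size hs i ((packages.length : Int) - 1) h0 (by omega) (by omega)
    have b1' : i ≤ least_not_fitting_package_idx packages i size := b1
    have b2' : least_not_fitting_package_idx packages i size ≤ (packages.length : Int) := by
      unfold least_not_fitting_package_idx; omega
    simp only [List.foldl, bLoop, ← heq]
    exact ih _ _ (by omega) (by omega)

-- ===== VERDICT (by name: the statement is the Claim_ definition above) =====
theorem supplier_wasted_spec : Claim_equal_supplier_wasted := by
  intro packages accumulated supplier _ hpre
  obtain ⟨hp, hsup, himp⟩ := hpre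
  unfold Spec_supplier_wasted supplier_wasted supplier_wasted_alt
  by_cases hg : PySem.List.pyGetD packages (-1) 0 >
      PySem.List.pyGetD (PySem.List.sorted supplier (fun x => x) false) (-1) 0
  · simp only [if_pos hg]
  · simp only [if_neg hg]
    have hsorted : packages.Pairwise (· ≤ ·) := by
      refine (himp ?_).1
      intro hall
      have hne : PySem.List.sorted supplier (fun x => x) false ≠ [] := by
        simp [PySem.List.sorted_eq_nil_iff, hsup]
      set s := PySem.List.sorted supplier (fun x => x) false with hsdef
      have hlast : s.getLast? = some (s.getLast hne) := List.getLast?_eq_some_getLast hne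
      have hmem : s.getLast hne ∈ supplier := by
        rw [← PySem.List.mem_sorted (key := fun x => x) (rev := false)]
        exact List.getLast_mem hne
      have hMval : PySem.List.pyGetD s (-1) 0 = s.getLast hne := by
        simp [PySem.List.pyGetD, PySem.List.pyGet?_neg_one, hlast]
      have := hall _ hmem
      rw [← hMval] at this
      omega
    exact loops_eq packages accumulated hsorted _ 0 0 (le_refl 0) (by positivity)
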